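-- pv_equiv track=rewrite | github.com/Noreh0/PassWordGame-Python | passwordgame.py | _rule10_has_consecutive_letters
-- ===== SOURCE A (Python) =====
-- def _rule10_has_consecutive_letters(password):
--     password_lower = password.lower()
--     for i in range(len(password_lower) - 2):
--         if (password_lower[i].isalpha() and
--                 password_lower[i + 1].isalpha() and
--                 password_lower[i + 2].isalpha() and
--                 ord(password_lower[i + 1]) == ord(password_lower[i]) + 1 and
--                 ord(password_lower[i + 2]) == ord(password_lower[i]) + 2):
--             return True
--     return False
-- ===== SOURCE B (Python) =====
-- def _rule10_has_consecutive_letters(password):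
--     run = 1
--     prev = None
--     for c in password.lower():
--         if prev is not None and prev.isalpha() and c.isalpha() and ord(c) == ord(prev) + 1:
--             run += 1
--         else:
--             run = 1
--         if run >= 3:
--             return True
--         prev = c
--     return False
-- ===== Notes on version B (the rewrite author's own statement) =====
-- stated objective: faster
-- what changed: Replaced the per-index 3-character window test (five conditions re-checked at every position) by a single pass that maintains a run-length counter of the current ascending alphabetic streak and returns once it reaches 3.
import Mathlib
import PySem

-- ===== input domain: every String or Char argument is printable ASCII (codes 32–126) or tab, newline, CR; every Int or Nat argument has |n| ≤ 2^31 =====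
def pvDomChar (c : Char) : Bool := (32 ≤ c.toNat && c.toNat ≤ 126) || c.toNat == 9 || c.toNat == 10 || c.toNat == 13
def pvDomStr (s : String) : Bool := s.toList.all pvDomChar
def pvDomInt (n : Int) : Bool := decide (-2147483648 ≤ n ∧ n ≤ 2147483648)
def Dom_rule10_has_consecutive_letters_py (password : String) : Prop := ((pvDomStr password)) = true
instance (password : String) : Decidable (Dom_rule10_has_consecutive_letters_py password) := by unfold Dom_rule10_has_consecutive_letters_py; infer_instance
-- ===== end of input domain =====

-- B replaces A's independent 3-character window test at each index by a one-pass ascending-run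
-- counter; same O(n) asymptotics with a smaller constant per character (objective: faster, measured).

-- ===== PORT A =====
-- the 5-conjunct window test A performs at index i of the lowered string
def pvWinA (cs : List Char) (i : Nat) : Bool :=
  match cs[i]?, cs[i+1]?, cs[i+2]? with
  | some a, some b, some c =>
      PySem.Chars.isalpha a && PySem.Chars.isalpha b && PySem.Chars.isalpha c &&
      (b.toNat == a.toNat + 1) && (c.toNat == a.toNat + 2)
  | _, _, _ => false

-- 'for i in range(stop): if <window at i>: return True' / 'return False'
def pvLoopA (cs : List Char) (stop i : Nat) : Bool :=
  if i < stop then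
    if pvWinA cs i then true else pvLoopA cs stop (i + 1)
  else false
termination_by stop - i

def rule10_has_consecutive_letters_py (password : String) : Bool :=
  let cs := (PySem.Str.lower password).toList
  pvLoopA cs (cs.length - 2) 0

-- ===== PORT B =====
-- one ascending-consecutive-alphabetic step from p to c
def pvStep (p c : Char) : Bool :=
  PySem.Chars.isalpha p && PySem.Chars.isalpha c && (c.toNat == p.toNat + 1)

-- single pass: prev = previous character, run = length of the current ascending streak
def pvLoopB : List Char → Option Char → Nat → Bool
  | [], _, _ => false
  | c :: rest, prev, run =>
      let run' := match prev with
        | some p => if pvStep p c then run + 1 else 1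
        | none => 1
      if 3 ≤ run' then true else pvLoopB rest (some c) run'

def rule10_has_consecutive_letters_py_alt (password : String) : Bool :=
  pvLoopB (PySem.Str.lower password).toList none 1

-- ===== PRECONDITION & SPEC =====
def Spec_rule10_has_consecutive_letters_py (password : String) (out : Bool) : Prop := out = rule10_has_consecutive_letters_py_alt password
instance (password : String) (out : Bool) : Decidable (Spec_rule10_has_consecutive_letters_py password out) := by unfold Spec_rule10_has_consecutive_letters_py; infer_instance

-- ===== CLAIM (what is proved, stated in full; the proofs are below) =====
def Claim_equal_rule10_has_consecutive_letters_py : Prop := ∀ (password : String), Dom_rule10_has_consecutive_letters_py password → Spec_rule10_has_consecutive_letters_py password (rule10_has_consecutive_letters_py password)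

-- ===== LEMMAS AND PROOFS =====

-- structural "some window exists" predicate, the meeting point of both proofs
def pvEW : List Char → Bool
  | a :: b :: t =>
      (match t with | c :: _ => pvStep a b && pvStep b c | [] => false) || pvEW (b :: t)
  | _ => false

theorem pvWinA_succ_cons (a : Char) (l : List Char) (j : Nat) :
    pvWinA (a :: l) (j + 1) = pvWinA l j := by
  simp [pvWinA]

theorem pvWinA_zero (a b : Char) (t : List Char) :
    pvWinA (a :: b :: t) 0 =
      (match t with | c :: _ => pvStep a b && pvStep b c | [] => false) := by
  cases t with
  | nil => simp [pvWinA]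
  | cons c t' =>
    simp only [pvWinA, pvStep, List.getElem?_cons_zero, List.getElem?_cons_succ]
    rw [Bool.eq_iff_iff]
    simp only [Bool.and_eq_true, beq_iff_eq]
    constructor
    · rintro ⟨⟨⟨⟨h1, h2⟩, h3⟩, h4⟩, h5⟩
      exact ⟨⟨⟨h1, h2⟩, by omega⟩, ⟨h2, h3⟩, by omega⟩
    · rintro ⟨⟨⟨h1, h2⟩, h4⟩, ⟨_, h3⟩, h5⟩
      exact ⟨⟨⟨⟨h1, h2⟩, h3⟩, by omega⟩, by omega⟩

theorem pvWinA_lt (cs : List Char) (j : Nat) (h : pvWinA cs j = true) :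
    j + 2 < cs.length := by
  unfold pvWinA at h
  split at h
  · next _ _ _ hc => exact (List.getElem?_eq_some_iff.mp ‹cs[j+2]? = some _›).1
  · exact absurd h (by simp)

theorem pvLoopA_iff (cs : List Char) (stop i : Nat) :
    pvLoopA cs stop i = true ↔ ∃ j, i ≤ j ∧ j < stop ∧ pvWinA cs j = true := by
  fun_induction pvLoopA cs stop i with
  | case1 i hlt hwin =>
    exact ⟨fun _ => ⟨i, le_refl i, hlt, hwin⟩, fun _ => rfl⟩
  | case2 i hlt hwin ih =>
    rw [ih]
    constructor
    · rintro ⟨j, h1, h2, h3⟩; exact ⟨j, by omega, h2, h3⟩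
    · rintro ⟨j, h1, h2, h3⟩
      refine ⟨j, ?_, h2, h3⟩
      rcases Nat.lt_or_ge i j with h | h
      · omega
      · have : j = i := by omega
        subst this; exact absurd h3 hwin
  | case3 i hlt =>
    constructor
    · intro h; exact absurd h (by simp)
    · rintro ⟨j, h1, h2, _⟩; omega

theorem pvEW_nil : pvEW [] = false := rfl
theorem pvEW_one (a : Char) : pvEW [a] = false := rfl
theorem pvEW_cons (a b : Char) (t : List Char) :
    pvEW (a :: b :: t) =
      ((match t with | c :: _ => pvStep a b && pvStep b c | [] => false) || pvEW (b :: t)) := rfl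

theorem pvEW_iff (cs : List Char) : pvEW cs = true ↔ ∃ j, pvWinA cs j = true := by
  induction cs with
  | nil =>
    rw [pvEW_nil]
    constructor
    · intro h; exact absurd h (by simp)
    · rintro ⟨j, h⟩
      have := pvWinA_lt _ _ h
      simp only [List.length_nil] at this; omega
  | cons a l ih =>
    cases l with
    | nil =>
      rw [pvEW_one]
      constructor
      · intro h; exact absurd h (by simp)
      · rintro ⟨j, h⟩
        have := pvWinA_lt _ _ h
        simp only [List.length_cons, List.length_nil] at this; omega
    | cons b t =>
      rw [pvEW_cons, Bool.or_eq_true, ih, ← pvWinA_zero]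
      constructor
      · rintro (h | ⟨j, h⟩)
        · exact ⟨0, h⟩
        · exact ⟨j + 1, by rwa [pvWinA_succ_cons]⟩
      · rintro ⟨j, h⟩
        cases j with
        | zero => exact Or.inl h
        | succ j' => exact Or.inr ⟨j', by rwa [pvWinA_succ_cons] at h⟩

theorem pvA_eq_pvEW (cs : List Char) : pvLoopA cs (cs.length - 2) 0 = pvEW cs := by
  rw [Bool.eq_iff_iff, pvLoopA_iff, pvEW_iff]
  constructor
  · rintro ⟨j, _, _, h⟩; exact ⟨j, h⟩
  · rintro ⟨j, h⟩
    have := pvWinA_lt _ _ h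
    exact ⟨j, Nat.zero_le j, by omega, h⟩

-- head-step helper for B's invariant
def pvHead (p : Char) : List Char → Bool
  | c :: _ => pvStep p c
  | [] => false

theorem pvLoopB_inv (l : List Char) (p : Char) (r : Nat) (hr : 1 ≤ r) :
    pvLoopB l (some p) r = (pvEW (p :: l) || (decide (2 ≤ r) && pvHead p l)) := by
  induction l generalizing p r with
  | nil => simp [pvLoopB, pvEW_one, pvHead]
  | cons c rest ih =>
    simp only [pvLoopB]
    by_cases hs : pvStep p c = true
    · rw [if_pos hs]
      by_cases h2 : 2 ≤ r
      · rw [if_pos (by omega)]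
        simp [pvHead, hs, h2]
      · rw [if_neg (by omega), ih c (r + 1) (by omega)]
        have h3 : (2 : Nat) ≤ r + 1 := by omega
        cases rest with
        | nil => simp [pvEW_cons, pvEW_one, pvHead, hs, h2, h3]
        | cons d t =>
          simp [pvEW_cons, pvHead, hs, h2, h3, Bool.or_comm]
    · rw [if_neg hs, if_neg (by omega), ih c 1 (le_refl 1)]
      have hs' : pvStep p c = false := by simpa using hs
      cases rest with
      | nil => simp [pvEW_cons, pvEW_one, pvHead, hs']
      | cons d t => simp [pvEW_cons, pvHead, hs']

theorem pvB_eq_pvEW (cs : List Char) : pvLoopB cs none 1 = pvEW cs := by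
  cases cs with
  | nil => rfl
  | cons c rest =>
    have h0 : pvLoopB (c :: rest) none 1 = pvLoopB rest (some c) 1 := rfl
    rw [h0, pvLoopB_inv rest c 1 (le_refl 1)]
    simp

-- ===== VERDICT (by name: the statement is the Claim_ definition above) =====
theorem rule10_has_consecutive_letters_py_spec : Claim_equal_rule10_has_consecutive_letters_py := by
  intro password _
  unfold Spec_rule10_has_consecutive_letters_py
  unfold rule10_has_consecutive_letters_py rule10_has_consecutive_letters_py_alt
  simp only
  rw [pvA_eq_pvEW, pvB_eq_pvEW]
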